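-- pv_equiv track=rewrite | github.com/mu-zhi/CaliberHub | scripts/localize_ai_descriptors.py | replace_or_insert_h1
-- ===== SOURCE A (Python) =====
-- def replace_or_insert_h1(body_lines: list[str], new_title: str) -> tuple[list[str], bool]:
--     expected_line = f"# {new_title}"
--     for idx, line in enumerate(body_lines):
--         if line.startswith("# "):
--             if line == expected_line and idx <= 2:
--                 return body_lines, False
--
--             new_body = body_lines[:]
--             new_body.pop(idx)
--
--             insert_at = 0
--             while insert_at < len(new_body) and not new_body[insert_at].strip():
--                 insert_at += 1
--             new_body[insert_at:insert_at] = [expected_line, ""]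
--             return new_body, True
--
--     insert_at = 0
--     while insert_at < len(body_lines) and not body_lines[insert_at].strip():
--         insert_at += 1
--     prefix = body_lines[:insert_at]
--     suffix = body_lines[insert_at:]
--     new_body = prefix + [expected_line, ""] + suffix
--     return new_body, True
-- ===== SOURCE B (Python) =====
-- def replace_or_insert_h1(body_lines: list[str], new_title: str) -> tuple[list[str], bool]:
--     expected = f"# {new_title}"
--     out = []          # output built front-to-back in one forward pass
--     popped = False    # has the (first) existing heading been dropped?
--     idx = 0
--     n = len(body_lines)
--     # phase 1: walk the leading-blank region of the post-pop list
--     while True: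
--         if idx < n and not body_lines[idx].strip():
--             out.append(body_lines[idx])
--             idx += 1
--         elif not popped and idx < n and body_lines[idx].startswith("# "):
--             if body_lines[idx] == expected and idx <= 2:
--                 return body_lines, False
--             popped = True
--             idx += 1
--         else:
--             out.append(expected)
--             out.append("")
--             break
--     # phase 2: copy the rest, dropping the first heading if not yet dropped
--     while idx < n:
--         line = body_lines[idx]
--         if not popped and line.startswith("# "):
--             if line == expected and idx <= 2:
--                 return body_lines, False
--             popped = True
--         else:
--             out.append(line)
--         idx += 1
--     return out, True
-- ===== Notes on version B (the rewrite author's own statement) =====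
-- stated objective: alternative
-- what changed: B builds the result list front-to-back in a single forward pass with an accumulator and popped/phase state flags, instead of A's scan-for-heading, copy-and-pop, blank-skip and slice-splice; no list copy, pop or splice is performed.
import Mathlib
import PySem

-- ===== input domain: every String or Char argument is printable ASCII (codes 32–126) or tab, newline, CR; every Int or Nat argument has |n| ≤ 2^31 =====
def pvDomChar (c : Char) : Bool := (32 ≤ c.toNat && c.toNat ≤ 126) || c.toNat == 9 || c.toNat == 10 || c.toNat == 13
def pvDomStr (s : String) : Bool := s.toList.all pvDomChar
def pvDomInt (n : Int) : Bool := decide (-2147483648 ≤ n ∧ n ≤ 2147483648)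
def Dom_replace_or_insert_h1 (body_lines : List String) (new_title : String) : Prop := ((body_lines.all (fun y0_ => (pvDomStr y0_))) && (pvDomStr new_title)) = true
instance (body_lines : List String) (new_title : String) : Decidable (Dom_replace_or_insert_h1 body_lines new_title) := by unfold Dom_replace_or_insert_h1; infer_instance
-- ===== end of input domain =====

-- ===== PORT A =====
-- Header: B rebuilds the result in one forward pass with an accumulator and state flags,
-- instead of A's search / copy-and-pop / blank-skip / splice; objective: alternative
-- decomposition. Equivalence is about the return value only (A mutates only a copy).

-- A-side helper: the 'insert_at' while-loop (count leading lines whose strip() is falsy).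
def pvSkipBlanksA (xs : List String) : Nat :=
  match xs with
  | [] => 0
  | h :: t => if PySem.Str.strip h == "" then pvSkipBlanksA t + 1 else 0

-- A's for-loop over enumerate(body_lines); 'orig' is the full body_lines, idx the enumerate index.
def pvLoopA (xs : List String) (idx : Nat) (orig : List String) (expected : String) : List String × Bool :=
  match xs with
  | [] =>
    -- fallback path: prefix = take insert_at, suffix = drop insert_at
    let at_ := pvSkipBlanksA orig
    (orig.take at_ ++ [expected, ""] ++ orig.drop at_, true)
  | line :: rest =>
    if PySem.Str.startswith line "# " then
      if line == expected && idx ≤ 2 then (orig, false)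
      else
        -- new_body = body_lines[:]; new_body.pop(idx) — idx is a valid enumerate index, so
        -- pop(idx) is exactly take idx ++ drop (idx+1)
        let nb := orig.take idx ++ orig.drop (idx + 1)
        let at_ := pvSkipBlanksA nb
        (nb.take at_ ++ [expected, ""] ++ nb.drop at_, true)
    else pvLoopA rest (idx + 1) orig expected

def replace_or_insert_h1 (body_lines : List String) (new_title : String) : List String × Bool :=
  pvLoopA body_lines 0 body_lines ("# " ++ new_title)

-- ===== PORT B =====
-- B's phase-2 while loop: copy the remaining lines, dropping the first heading if not yet
-- dropped; 'none' = the early 'return body_lines, False'.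
def pvPhase2B (expected : String) : List String → Nat → Bool → List String → Option (List String)
  | [], _, _, out => some out
  | l :: rest, idx, popped, out =>
    if !popped && PySem.Str.startswith l "# " then
      if l == expected && idx ≤ 2 then none
      else pvPhase2B expected rest (idx + 1) true out
    else pvPhase2B expected rest (idx + 1) popped (out ++ [l])

-- B's phase-1 while loop: the leading-blank region of the post-pop list; on its exit the
-- heading pair is appended and phase 2 takes over.
def pvPhase1B (expected : String) : List String → Nat → Bool → List String → Option (List String)
  | l :: t, idx, popped, out =>
    if PySem.Str.strip l == "" then pvPhase1B expected t (idx + 1) popped (out ++ [l])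
    else if !popped && PySem.Str.startswith l "# " then
      if l == expected && idx ≤ 2 then none
      else pvPhase1B expected t (idx + 1) true out
    else pvPhase2B expected (l :: t) idx popped (out ++ [expected, ""])
  | [], _, _, out => some (out ++ [expected, ""])

def replace_or_insert_h1_alt (body_lines : List String) (new_title : String) : List String × Bool :=
  match pvPhase1B ("# " ++ new_title) body_lines 0 false [] with
  | none => (body_lines, false)
  | some out => (out, true)

-- ===== PRECONDITION & SPEC =====
def Spec_replace_or_insert_h1 (body_lines : List String) (new_title : String) (out : List String × Bool) : Prop := out = replace_or_insert_h1_alt body_lines new_title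
instance (body_lines : List String) (new_title : String) (out : List String × Bool) : Decidable (Spec_replace_or_insert_h1 body_lines new_title out) := by unfold Spec_replace_or_insert_h1; infer_instance

-- ===== CLAIM =====
def Claim_equal_replace_or_insert_h1 : Prop := ∀ (body_lines : List String) (new_title : String), Dom_replace_or_insert_h1 body_lines new_title → Spec_replace_or_insert_h1 body_lines new_title (replace_or_insert_h1 body_lines new_title)

-- ===== LEMMAS AND PROOFS =====

-- the inserted block at the leading-blank position of ys
def pvInsB (e : String) (ys : List String) : List String :=
  ys.take (pvSkipBlanksA ys) ++ [e, ""] ++ ys.drop (pvSkipBlanksA ys)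

-- a line whose strip() is empty cannot start with "# "
lemma blank_not_heading (l : String) (h : (PySem.Str.strip l == "") = true) :
    PySem.Str.startswith l "# " = false := by
  by_contra hc
  have hsw : PySem.Str.startswith l "# " = true := by
    cases hx : PySem.Str.startswith l "# " <;> simp_all
  have hpre : ("# ".toList) <+: l.toList :=
    (PySem.Chars.startswith_iff l.toList "# ".toList).mp (by simpa [PySem.Str.startswith] using hsw)
  obtain ⟨rest, hrest⟩ := hpre
  have hstrip : PySem.Str.strip l = "" := by simpa using h
  have hchars : PySem.Chars.strip l.toList = [] := by
    have : (PySem.Str.strip l).toList = [] := by rw [hstrip]; rfl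
    simpa [PySem.Str.strip] using this
  rw [← hrest, show ("# ".toList) ++ rest = '#' :: ' ' :: rest from rfl] at hchars
  have h1 : PySem.Chars.lstrip ('#' :: ' ' :: rest) = '#' :: ' ' :: rest := by
    unfold PySem.Chars.lstrip
    exact List.dropWhile_cons_of_neg (by decide)
  rw [PySem.Chars.strip, h1, PySem.Chars.rstrip] at hchars
  have h2 : List.dropWhile PySem.Chars.isspace (('#' :: ' ' :: rest).reverse) = [] := by
    have := congrArg List.reverse hchars
    simpa using this
  have hall := List.dropWhile_eq_nil_iff.mp h2
  have := hall '#' (by simp)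
  exact absurd this (by decide)

lemma phase2_true (e : String) (xs : List String) : ∀ (idx : Nat) (out : List String),
    pvPhase2B e xs idx true out = some (out ++ xs) := by
  induction xs with
  | nil => intro idx out; simp [pvPhase2B]
  | cons h t ih => intro idx out; simp [pvPhase2B, ih]

lemma phase2_false (e : String) (xs : List String) : ∀ (idx : Nat) (out : List String),
    pvPhase2B e xs idx false out =
      match xs.findIdx? (fun l => PySem.Str.startswith l "# ") with
      | none => some (out ++ xs)
      | some j =>
        if xs.getD j "" == e && idx + j ≤ 2 then none
        else some (out ++ (xs.take j ++ xs.drop (j + 1))) := by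
  induction xs with
  | nil => intro idx out; simp [pvPhase2B]
  | cons h t ih =>
    intro idx out
    have hfc : (h :: t).findIdx? (fun l => PySem.Str.startswith l "# ")
        = if PySem.Str.startswith h "# " then some 0
          else (t.findIdx? (fun l => PySem.Str.startswith l "# ")).map (· + 1) :=
      List.findIdx?_cons
    by_cases hh : PySem.Str.startswith h "# "
    · rw [pvPhase2B, hfc, if_pos hh]
      simp only [hh, Bool.not_false, Bool.true_and, List.getD_cons_zero, Nat.add_zero,
        List.take_zero, List.nil_append, List.drop_succ_cons, List.drop_zero]
      split_ifs <;> first | rfl | rw [phase2_true]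
    · rw [pvPhase2B, hfc, if_neg hh]
      simp only [hh, Bool.false_eq_true, Bool.and_false, if_false, Bool.not_false]
      rw [ih (idx + 1) (out ++ [h])]
      cases hfi : t.findIdx? (fun l => PySem.Str.startswith l "# ") with
      | none => simp
      | some j =>
        simp only [Option.map_some, List.getD_cons_succ, List.take_succ_cons, List.drop_succ_cons]
        have harith : idx + 1 + j = idx + (j + 1) := by omega
        rw [harith]
        split_ifs <;> simp

lemma phase1_true (e : String) (xs : List String) : ∀ (idx : Nat) (out : List String),
    pvPhase1B e xs idx true out = some (out ++ pvInsB e xs) := by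
  induction xs with
  | nil => intro idx out; simp [pvPhase1B, pvInsB, pvSkipBlanksA]
  | cons h t ih =>
    intro idx out
    by_cases hb : (PySem.Str.strip h == "") = true
    · rw [pvPhase1B, if_pos hb, ih]
      simp [pvInsB, pvSkipBlanksA, hb]
    · rw [pvPhase1B, if_neg hb]
      simp only [Bool.not_true, Bool.false_and, Bool.false_eq_true, if_false]
      rw [phase2_true]
      simp [pvInsB, pvSkipBlanksA, hb]

lemma phase1_false (e : String) (xs : List String) : ∀ (idx : Nat) (out : List String),
    pvPhase1B e xs idx false out =
      match xs.findIdx? (fun l => PySem.Str.startswith l "# ") with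
      | none => some (out ++ pvInsB e xs)
      | some j =>
        if xs.getD j "" == e && idx + j ≤ 2 then none
        else some (out ++ pvInsB e (xs.take j ++ xs.drop (j + 1))) := by
  induction xs with
  | nil => intro idx out; simp [pvPhase1B, pvInsB, pvSkipBlanksA]
  | cons h t ih =>
    intro idx out
    have hfc : (h :: t).findIdx? (fun l => PySem.Str.startswith l "# ")
        = if PySem.Str.startswith h "# " then some 0
          else (t.findIdx? (fun l => PySem.Str.startswith l "# ")).map (· + 1) :=
      List.findIdx?_cons
    by_cases hb : (PySem.Str.strip h == "") = true
    · have hnh : PySem.Str.startswith h "# " = false := blank_not_heading h hb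
      rw [pvPhase1B, if_pos hb, ih, hfc, if_neg (by simpa using hnh)]
      cases hfi : t.findIdx? (fun l => PySem.Str.startswith l "# ") with
      | none => simp [pvInsB, pvSkipBlanksA, hb]
      | some j =>
        simp only [Option.map_some, List.getD_cons_succ, List.take_succ_cons, List.drop_succ_cons]
        have harith : idx + 1 + j = idx + (j + 1) := by omega
        rw [harith]
        split_ifs with hcond
        · rfl
        · simp [pvInsB, pvSkipBlanksA, hb]
    · rw [pvPhase1B, if_neg hb]
      by_cases hh : PySem.Str.startswith h "# "
      · rw [hfc, if_pos hh]
        simp only [hh, Bool.not_false, Bool.true_and, List.getD_cons_zero, Nat.add_zero,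
          List.take_zero, List.nil_append, List.drop_succ_cons, List.drop_zero]
        split_ifs <;> first | rfl | rw [phase1_true]
      · rw [hfc, if_neg hh]
        simp only [hh, Bool.false_eq_true, Bool.and_false, if_false, Bool.not_false]
        rw [phase2_false]
        rw [hfc, if_neg hh]
        cases hfi : t.findIdx? (fun l => PySem.Str.startswith l "# ") with
        | none => simp [pvInsB, pvSkipBlanksA, hb]
        | some j =>
          simp only [Option.map_some, List.getD_cons_succ, List.take_succ_cons, List.drop_succ_cons]
          split_ifs with hcond
          · rfl
          · simp [pvInsB, pvSkipBlanksA, hb]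

lemma loopA_eq (xs : List String) : ∀ (idx : Nat) (orig : List String) (expected : String),
    pvLoopA xs idx orig expected =
      match xs.findIdx? (fun l => PySem.Str.startswith l "# ") with
      | none =>
        let at_ := pvSkipBlanksA orig
        (orig.take at_ ++ [expected, ""] ++ orig.drop at_, true)
      | some j =>
        if xs.getD j "" == expected && idx + j ≤ 2 then (orig, false)
        else
          let nb := orig.take (idx + j) ++ orig.drop (idx + j + 1)
          let at_ := pvSkipBlanksA nb
          (nb.take at_ ++ [expected, ""] ++ nb.drop at_, true) := by
  induction xs with
  | nil => intro idx orig expected; simp [pvLoopA]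
  | cons h t ih =>
    intro idx orig expected
    by_cases hs : PySem.Str.startswith h "# "
    · rw [pvLoopA]
      simp only [hs, if_true, List.findIdx?_cons]
      simp
    · simp only [pvLoopA, hs, if_false, Bool.false_eq_true, List.findIdx?_cons, ih (idx + 1)]
      cases hfi : t.findIdx? (fun l => PySem.Str.startswith l "# ") with
      | none => simp
      | some j =>
        simp only [Option.map_some, List.getD_cons_succ]
        have : idx + 1 + j = idx + (j + 1) := by omega
        rw [this]

-- ===== VERDICT =====
theorem replace_or_insert_h1_spec : Claim_equal_replace_or_insert_h1 := by
  intro body_lines new_title _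
  unfold Spec_replace_or_insert_h1 replace_or_insert_h1 replace_or_insert_h1_alt
  rw [loopA_eq, phase1_false]
  cases hfi : body_lines.findIdx? (fun l => PySem.Str.startswith l "# ") with
  | none => simp [pvInsB]
  | some j =>
    simp only
    split_ifs with hc
    · rfl
    · simp [pvInsB]
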